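-- pv_equiv track=rewrite | github.com/gagasli/KBAI | Mini-Project 2/BlockWorldAgent.py | get_block_relationships
-- ===== SOURCE A (Python) =====
-- def get_block_relationships(state):
--     # This function generates a dictionary indicating the block relationships
-- 	# (top and bottom) for each block in a given state.
--     relationships = {}  # Initialize an empty dictionary to store the relationships
--     for stack in state:  # Iterate through each stack in the state
--         for i, block in enumerate(stack):  # Iterate through each block in the stack
--             # Determine the block on top, if any
--             top_block = stack[i + 1] if i + 1 < len(stack) else None
--             # Determine the block below, or 'Table' if it's the bottom block
--             bottom_block = stack[i - 1] if i > 0 else 'Table'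
--             # Store the relationships in the dictionary
--             relationships[block] = [top_block, bottom_block]
--     return relationships  # Return the relationships dictionary
-- ===== SOURCE B (Python) =====
-- def get_block_relationships(state):
--     # Staged edge-pass: record each adjacency (lower, upper) once in two edge
--     # dictionaries, then assemble the result in first-occurrence order.
--     tops, bots = {}, {}
--     for stack in state:
--         if stack:
--             bots[stack[0]] = 'Table'
--         for lower, upper in zip(stack, stack[1:]):
--             tops[lower] = upper
--             bots[upper] = lower
--         if stack:
--             tops[stack[-1]] = None
--     return {block: [tops[block], bots[block]] for stack in state for block in stack}
-- ===== Notes on version B (the rewrite author's own statement) =====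
-- stated objective: alternative
-- what changed: B replaces A's single pass computing both neighbours per index with a staged edge pass: it records each adjacency once into two edge dictionaries (tops, bots), then assembles the result dictionary in traversal order from those maps.
import Mathlib
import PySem

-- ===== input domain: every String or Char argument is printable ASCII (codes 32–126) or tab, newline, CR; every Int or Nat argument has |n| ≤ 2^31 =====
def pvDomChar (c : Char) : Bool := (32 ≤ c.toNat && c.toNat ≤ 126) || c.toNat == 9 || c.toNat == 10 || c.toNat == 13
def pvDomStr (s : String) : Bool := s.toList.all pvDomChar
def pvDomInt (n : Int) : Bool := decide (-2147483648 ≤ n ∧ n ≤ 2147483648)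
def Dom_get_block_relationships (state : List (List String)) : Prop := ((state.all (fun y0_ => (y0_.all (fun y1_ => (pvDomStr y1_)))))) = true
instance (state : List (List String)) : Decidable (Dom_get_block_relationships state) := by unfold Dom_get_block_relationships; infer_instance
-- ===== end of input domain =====

-- B replaces A's per-index pass with a staged edge pass: two edge dictionaries (tops, bots)
-- record each adjacency once, and the result dictionary is assembled from them afterwards
-- (objective: alternative; same O(n) cost).

-- ===== PORT A =====
def get_block_relationships (state : List (List String)) : List (String × List (Option String)) :=
  (state.foldl
    (fun (relationships : PySem.Dict String (List (Option String))) stack =>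
      (PySem.List.enumerate stack).foldl
        (fun relationships ib =>
          -- top_block = stack[i + 1] if i + 1 < len(stack) else None
          let top_block : Option String :=
            if ib.1 + 1 < (stack.length : Int) then PySem.List.pyGet? stack (ib.1 + 1) else none
          -- bottom_block = stack[i - 1] if i > 0 else 'Table'
          let bottom_block : Option String :=
            if ib.1 > 0 then PySem.List.pyGet? stack (ib.1 - 1) else some "Table"
          relationships.insert ib.2 [top_block, bottom_block])
        relationships)
    PySem.Dict.empty).items

-- ===== PORT B =====
def get_block_relationships_alt (state : List (List String)) : List (String × List (Option String)) :=
  -- tops, bots = {}, {}  … the edge pass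
  let tb : PySem.Dict String (Option String) × PySem.Dict String (Option String) :=
    state.foldl
      (fun tb stack =>
        -- if stack: bots[stack[0]] = 'Table'
        let tb := match stack.head? with
          | none => tb
          | some h => (tb.1, tb.2.insert h (some "Table"))
        -- for lower, upper in zip(stack, stack[1:]): tops[lower] = upper; bots[upper] = lower
        let tb := (stack.zip stack.tail).foldl
          (fun tb p => (tb.1.insert p.1 (some p.2), tb.2.insert p.2 (some p.1))) tb
        -- if stack: tops[stack[-1]] = None
        match stack.getLast? with
          | none => tb
          | some z => (tb.1.insert z none, tb.2))
      (PySem.Dict.empty, PySem.Dict.empty)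
  -- {block: [tops[block], bots[block]] for stack in state for block in stack}
  -- (tops[block]/bots[block] never raise: every block of state is a key of both maps,
  --  so getD with an arbitrary default is exact here)
  (state.foldl
    (fun (d : PySem.Dict String (List (Option String))) stack =>
      stack.foldl (fun d b => d.insert b [tb.1.getD b none, tb.2.getD b none]) d)
    PySem.Dict.empty).items

-- ===== PRECONDITION & SPEC =====
def Spec_get_block_relationships (state : List (List String)) (out : List (String × List (Option String))) : Prop := out = get_block_relationships_alt state
instance (state : List (List String)) (out : List (String × List (Option String))) : Decidable (Spec_get_block_relationships state out) := by unfold Spec_get_block_relationships; infer_instance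

-- ===== CLAIM (what is proved, stated in full; the proofs are below) =====
def Claim_equal_get_block_relationships : Prop := ∀ (state : List (List String)), Dom_get_block_relationships state → Spec_get_block_relationships state (get_block_relationships state)

-- ===== LEMMAS AND PROOFS =====

-- the two neighbour values A computes for index i of a stack
def pvTopv (s : List String) (i : Int) : Option String :=
  if i + 1 < (s.length : Int) then PySem.List.pyGet? s (i + 1) else none
def pvBotv (s : List String) (i : Int) : Option String :=
  if i > 0 then PySem.List.pyGet? s (i - 1) else some "Table"

-- one stack's blocks with both neighbour values, in traversal order
def pvTrip (s : List String) : List (String × Option String × Option String) :=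
  (PySem.List.enumerate s).map (fun ib => (ib.2, pvTopv s ib.1, pvBotv s ib.1))
def pvTrips (state : List (List String)) : List (String × Option String × Option String) :=
  state.flatMap pvTrip

-- insert a pair list into a dict
def pvIns {V : Type} (L : List (String × V)) (d : PySem.Dict String V) : PySem.Dict String V :=
  L.foldl (fun d p => d.insert p.1 p.2) d

-- the per-stack assignment sequences of B's edge pass
def pvTopsRow (s : List String) : List (String × Option String) :=
  (s.zip s.tail).map (fun p => (p.1, some p.2)) ++
    (match s.getLast? with | none => [] | some z => [(z, none)])
def pvBotsRow (s : List String) : List (String × Option String) :=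
  (match s.head? with | none => [] | some h => [(h, some "Table")]) ++
    (s.zip s.tail).map (fun p => (p.2, some p.1))

-- get? of an insert fold is the LAST value assigned to the key
lemma get?_pvIns {V : Type} (L : List (String × V)) (d : PySem.Dict String V) (k : String) :
    (pvIns L d).get? k =
      match L.reverse.find? (fun p => p.1 == k) with
      | some p => some p.2
      | none => d.get? k := by
  induction L generalizing d with
  | nil => simp [pvIns]
  | cons x L ih =>
    simp only [pvIns, List.foldl_cons, List.reverse_cons, List.find?_append]
    rw [show List.foldl (fun d p => d.insert p.1 p.2) (d.insert x.1 x.2) L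
          = pvIns L (d.insert x.1 x.2) from rfl, ih]
    cases h : L.reverse.find? (fun p => p.1 == k) with
    | some p => simp [h]
    | none =>
      simp only [h, Option.none_or]
      by_cases hk : x.1 = k
      · simp [List.find?, hk, PySem.Dict.get?_insert]
      · have hb : (x.1 == k) = false := by simpa using hk
        simp [List.find?, hb, PySem.Dict.get?_insert, Ne.symm hk]

-- two dicts with equal (nodup) key lists and equal lookups are equal
lemma dict_eq_of_keys_get? {V : Type} (d d' : PySem.Dict String V)
    (hn : d.keys.Nodup) (hk : d.keys = d'.keys) (hg : ∀ k, d.get? k = d'.get? k) : d = d' :=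
  by
  have hn' : d'.keys.Nodup := hk ▸ hn
  apply PySem.Dict.ext
  have hlen : d.items.length = d'.items.length := by
    have := congrArg List.length hk
    simpa [PySem.Dict.keys] using this
  apply List.ext_getElem hlen
  intro i h1 h2
  have hfst : d.items[i].1 = d'.items[i].1 := by
    have := congrArg (fun l => l[i]?) hk
    simpa [PySem.Dict.keys, List.getElem?_map, List.getElem?_eq_getElem, h1, h2] using this
  have hm1 : (d.items[i].1, d.items[i].2) ∈ d.items := by
    have := List.getElem_mem h1 (l := d.items)
    simpa using this
  have hm2 : (d'.items[i].1, d'.items[i].2) ∈ d'.items := by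
    have := List.getElem_mem h2 (l := d'.items)
    simpa using this
  have g1 := PySem.Dict.get?_of_mem_items d hm1 hn
  have g2 := PySem.Dict.get?_of_mem_items d' hm2 hn'
  rw [← hfst] at g2
  have := (hg d.items[i].1).symm.trans g1
  rw [g2] at this
  have hsnd : d.items[i].2 = d'.items[i].2 := by
    exact (Option.some_injective _ this.symm)
  exact Prod.ext hfst hsnd

-- pvTrip's keys are the stack itself
lemma map_fst_pvTrip (s : List String) : (pvTrip s).map Prod.fst = s := by
  simp only [pvTrip, List.map_map]
  exact PySem.List.map_snd_enumerate s 0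

lemma map_fst_pvTrips (state : List (List String)) :
    (pvTrips state).map Prod.fst = state.flatMap id := by
  simp only [pvTrips, List.map_flatMap]
  exact List.flatMap_congr (fun s _ => map_fst_pvTrip s)

lemma pvTopsRow_eq (s : List String) :
    pvTopsRow s = (pvTrip s).map (fun q => (q.1, q.2.1)) := by
  cases s with
  | nil => rfl
  | cons a t =>
    have hne : (a :: t) ≠ [] := by simp
    apply List.ext_getElem
    · simp [pvTopsRow, pvTrip, PySem.List.length_enumerate, List.length_zip,
        List.getLast?_eq_some_getLast hne]
    · intro i h1 h2
      have hn : i < t.length + 1 := by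
        simpa [pvTrip, PySem.List.length_enumerate] using h2
      simp only [pvTopsRow, pvTrip, List.map_map, List.getElem_map,
        PySem.List.getElem_enumerate, List.getLast?_eq_some_getLast hne, List.tail_cons]
      by_cases hi : i < t.length
      · rw [List.getElem_append_left (by simp [List.length_zip]; omega)]
        simp only [List.getElem_map, List.getElem_zip]
        refine Prod.ext (by simp) ?_
        show some _ = pvTopv (a :: t) (0 + (i : Int))
        have hc : (0 + (i : Int)) + 1 = ((i + 1 : Nat) : Int) := by push_cast; ring
        simp only [pvTopv, hc]
        rw [if_pos (by simp only [List.length_cons]; push_cast; omega), PySem.List.pyGet?_natCast]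
        simp [List.getElem?_eq_getElem (by simp; omega : i + 1 < (a :: t).length)]
      · have hie : i = t.length := by omega
        rw [List.getElem_append_right (by simp [List.length_zip]; omega)]
        have h0 : i - (((a::t).zip t).map (fun p => (p.1, some p.2))).length = 0 := by
          simp only [List.length_map, List.length_zip, List.length_cons]; omega
        simp only [h0, List.getElem_cons_zero]
        refine Prod.ext ?_ ?_
        · show (a :: t).getLast hne = _
          rw [List.getLast_eq_getElem]
          simp [hie]
        · show (none : Option String) = pvTopv (a :: t) (0 + (i : Int))
          simp only [pvTopv]
          rw [if_neg (by simp only [List.length_cons]; push_cast; omega)]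

lemma pvBotsRow_eq (s : List String) :
    pvBotsRow s = (pvTrip s).map (fun q => (q.1, q.2.2)) := by
  cases s with
  | nil => rfl
  | cons a t =>
    apply List.ext_getElem
    · simp [pvBotsRow, pvTrip, PySem.List.length_enumerate, List.length_zip]
    · intro i h1 h2
      have hn : i < t.length + 1 := by
        simpa [pvTrip, PySem.List.length_enumerate] using h2
      simp only [pvBotsRow, pvTrip, List.map_map, List.getElem_map,
        PySem.List.getElem_enumerate, List.head?_cons, List.tail_cons]
      cases i with
      | zero =>
        simp [pvBotv]
      | succ j =>
        simp only [List.singleton_append, List.getElem_cons_succ,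
          List.getElem_map, List.getElem_zip, Function.comp]
        refine Prod.ext (by simp) ?_
        show some _ = pvBotv (a :: t) (0 + ((j+1 : Nat) : Int))
        have hc : (0 + ((j+1 : Nat) : Int)) - 1 = ((j : Nat) : Int) := by push_cast; ring
        simp only [pvBotv]
        rw [if_pos (by push_cast; omega), hc, PySem.List.pyGet?_natCast]
        simp [List.getElem?_eq_getElem (by simp; omega : j < (a :: t).length)]

-- A's dict is the insert fold of the triple list's rows
lemma dictA_eq (state : List (List String)) :
    (state.foldl
      (fun (relationships : PySem.Dict String (List (Option String))) stack =>
        (PySem.List.enumerate stack).foldl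
          (fun relationships ib =>
            let top_block : Option String :=
              if ib.1 + 1 < (stack.length : Int) then PySem.List.pyGet? stack (ib.1 + 1) else none
            let bottom_block : Option String :=
              if ib.1 > 0 then PySem.List.pyGet? stack (ib.1 - 1) else some "Table"
            relationships.insert ib.2 [top_block, bottom_block])
          relationships)
      PySem.Dict.empty)
    = pvIns ((pvTrips state).map (fun q => (q.1, [q.2.1, q.2.2]))) PySem.Dict.empty := by
  simp only [pvIns, List.foldl_map, pvTrips, List.foldl_flatMap, pvTrip]
  rfl

-- one outer step of B's edge pass, componentwise
lemma edge_step_eq (tb : PySem.Dict String (Option String) × PySem.Dict String (Option String))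
    (stack : List String) :
    (let tb := match stack.head? with
      | none => tb
      | some h => (tb.1, tb.2.insert h (some "Table"))
    let tb := (stack.zip stack.tail).foldl
      (fun tb p => (tb.1.insert p.1 (some p.2), tb.2.insert p.2 (some p.1))) tb
    match stack.getLast? with
      | none => tb
      | some z => (tb.1.insert z none, tb.2))
    = (pvIns (pvTopsRow stack) tb.1, pvIns (pvBotsRow stack) tb.2) := by
  cases stack with
  | nil => simp [pvIns, pvTopsRow, pvBotsRow]
  | cons a t =>
    have hne : (a :: t) ≠ [] := by simp
    simp only [List.head?_cons, List.getLast?_eq_some_getLast hne, List.tail_cons,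
      pvIns, pvTopsRow, pvBotsRow, List.foldl_append,
      List.foldl_map, List.singleton_append, List.foldl_cons, List.foldl_nil]
    rw [PySem.List.foldl_prod_mk (fun x y => x.insert y.1 (some y.2))
      (fun x y => x.insert y.2 (some y.1)) ((a :: t).zip t) tb.1 (tb.2.insert a (some "Table"))]

-- B's edge pass computes the two insert folds of the row sequences
lemma edge_pass_eq (state : List (List String)) :
    (state.foldl
      (fun (tb : PySem.Dict String (Option String) × PySem.Dict String (Option String)) stack =>
        let tb := match stack.head? with
          | none => tb
          | some h => (tb.1, tb.2.insert h (some "Table"))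
        let tb := (stack.zip stack.tail).foldl
          (fun tb p => (tb.1.insert p.1 (some p.2), tb.2.insert p.2 (some p.1))) tb
        match stack.getLast? with
          | none => tb
          | some z => (tb.1.insert z none, tb.2))
      (PySem.Dict.empty, PySem.Dict.empty))
    = (pvIns ((pvTrips state).map (fun q => (q.1, q.2.1))) PySem.Dict.empty,
       pvIns ((pvTrips state).map (fun q => (q.1, q.2.2))) PySem.Dict.empty) := by
  have h1 : ∀ (tb : PySem.Dict String (Option String) × PySem.Dict String (Option String)),
      state.foldl
        (fun tb stack =>
          let tb := match stack.head? with
            | none => tb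
            | some h => (tb.1, tb.2.insert h (some "Table"))
          let tb := (stack.zip stack.tail).foldl
            (fun tb p => (tb.1.insert p.1 (some p.2), tb.2.insert p.2 (some p.1))) tb
          match stack.getLast? with
            | none => tb
            | some z => (tb.1.insert z none, tb.2)) tb
      = state.foldl (fun tb stack => (pvIns (pvTopsRow stack) tb.1, pvIns (pvBotsRow stack) tb.2)) tb := by
    intro tb
    exact PySem.List.foldl_congr_mem state _ _ tb (fun tb stack _ => edge_step_eq tb stack)
  rw [h1, PySem.List.foldl_prod_mk (fun t s => pvIns (pvTopsRow s) t) (fun b s => pvIns (pvBotsRow s) b)]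
  have hT : state.foldl (fun t s => pvIns (pvTopsRow s) t) PySem.Dict.empty
      = pvIns ((pvTrips state).map (fun q => (q.1, q.2.1))) PySem.Dict.empty := by
    simp only [pvIns, pvTrips, List.map_flatMap, List.foldl_flatMap]
    exact (PySem.List.foldl_congr_mem state _ _ PySem.Dict.empty (fun t s _ => by rw [← pvTopsRow_eq s])).symm
  have hB : state.foldl (fun b s => pvIns (pvBotsRow s) b) PySem.Dict.empty
      = pvIns ((pvTrips state).map (fun q => (q.1, q.2.2))) PySem.Dict.empty := by
    simp only [pvIns, pvTrips, List.map_flatMap, List.foldl_flatMap]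
    exact (PySem.List.foldl_congr_mem state _ _ PySem.Dict.empty (fun b s _ => by rw [← pvBotsRow_eq s])).symm
  rw [hT, hB]

-- keys of an insert fold from empty, as an update of the empty key set
lemma keys_pvIns_empty {V : Type} (L : List (String × V)) :
    (pvIns L PySem.Dict.empty).keys = PySem.Set.update [] (L.map Prod.fst) := by
  have := PySem.Dict.keys_foldl_insert_key L Prod.fst (fun d p => p.2) PySem.Dict.empty
  simpa [pvIns, PySem.Dict.keys_empty] using this

lemma nodup_keys_pvIns_empty {V : Type} (L : List (String × V)) :
    (pvIns L PySem.Dict.empty).keys.Nodup := by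
  have := PySem.Dict.nodup_keys_foldl_insert_key L Prod.fst (fun d p => p.2) PySem.Dict.empty
    (by simp [PySem.Dict.keys_empty])
  simpa [pvIns] using this

-- ===== VERDICT (by name: the statement is the Claim_ definition above) =====
theorem get_block_relationships_spec : Claim_equal_get_block_relationships := by
  intro state _
  show get_block_relationships state = get_block_relationships_alt state
  set tops := pvIns ((pvTrips state).map (fun q => (q.1, q.2.1))) PySem.Dict.empty with htops
  set bots := pvIns ((pvTrips state).map (fun q => (q.1, q.2.2))) PySem.Dict.empty with hbots
  have hAlt : get_block_relationships_alt state
      = (state.foldl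
          (fun (d : PySem.Dict String (List (Option String))) stack =>
            stack.foldl (fun d b => d.insert b [tops.getD b none, bots.getD b none]) d)
          PySem.Dict.empty).items := by
    unfold get_block_relationships_alt
    rw [edge_pass_eq state]
  have hA : get_block_relationships state
      = (pvIns ((pvTrips state).map (fun q => (q.1, [q.2.1, q.2.2]))) PySem.Dict.empty).items := by
    unfold get_block_relationships
    rw [dictA_eq state]
  have hBfold :
      (state.foldl
        (fun (d : PySem.Dict String (List (Option String))) stack =>
          stack.foldl (fun d b => d.insert b [tops.getD b none, bots.getD b none]) d)
        PySem.Dict.empty)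
      = pvIns ((state.flatMap id).map
          (fun b => (b, [tops.getD b none, bots.getD b none]))) PySem.Dict.empty := by
    simp only [pvIns, List.map_flatMap, List.foldl_flatMap, List.foldl_map, id]
  rw [hA, hAlt, hBfold]
  congr 1
  apply dict_eq_of_keys_get?
  · exact nodup_keys_pvIns_empty _
  · rw [keys_pvIns_empty, keys_pvIns_empty]
    congr 1
    rw [List.map_map, List.map_map,
      show (Prod.fst ∘ fun (q : String × Option String × Option String) => (q.1, [q.2.1, q.2.2]))
        = Prod.fst from rfl,
      show (Prod.fst ∘ fun (b : String) => (b, [tops.getD b none, bots.getD b none]))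
        = id from rfl,
      map_fst_pvTrips]
    simp
  · intro k
    rw [get?_pvIns, get?_pvIns]
    have hfst : (state.flatMap id).reverse = (pvTrips state).reverse.map Prod.fst := by
      rw [← map_fst_pvTrips]
      exact List.map_reverse.symm
    have hrevA : ((pvTrips state).map (fun q => (q.1, [q.2.1, q.2.2]))).reverse
        = (pvTrips state).reverse.map (fun q => (q.1, [q.2.1, q.2.2])) := List.map_reverse.symm
    have hrevB : (((state.flatMap id).map
          (fun b => (b, [tops.getD b none, bots.getD b none]))).reverse : List (String × List (Option String)))
        = ((pvTrips state).reverse.map Prod.fst).map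
            (fun b => (b, [tops.getD b none, bots.getD b none])) := by
      rw [← List.map_reverse, hfst]
    rw [hrevA, hrevB, List.find?_map, List.find?_map,
      show ((fun (p : String × List (Option String)) => p.1 == k) ∘
        (fun (q : String × Option String × Option String) => (q.1, [q.2.1, q.2.2])))
        = (fun (q : String × Option String × Option String) => q.1 == k) from rfl,
      show ((fun (p : String × List (Option String)) => p.1 == k) ∘
        (fun b => (b, [tops.getD b none, bots.getD b none]))) = (fun (b : String) => b == k) from rfl,
      List.find?_map,
      show ((fun (b : String) => b == k) ∘ (Prod.fst : String × Option String × Option String → String))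
        = (fun (q : String × Option String × Option String) => q.1 == k) from rfl]
    cases hX : (pvTrips state).reverse.find? (fun q => q.1 == k) with
    | none => simp
    | some q =>
      have hqk : q.1 = k := by
        have := List.find?_some hX
        simpa using this
      simp only [Option.map_some]
      have hT : tops.getD q.1 none = q.2.1 := by
        rw [PySem.Dict.getD_eq_get?_getD, htops, get?_pvIns, ← List.map_reverse, List.find?_map,
          show ((fun (p : String × Option String) => p.1 == q.1) ∘
            (fun (t : String × Option String × Option String) => (t.1, t.2.1)))
            = (fun (t : String × Option String × Option String) => t.1 == q.1) from rfl,
          hqk, hX]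
        rfl
      have hB : bots.getD q.1 none = q.2.2 := by
        rw [PySem.Dict.getD_eq_get?_getD, hbots, get?_pvIns, ← List.map_reverse, List.find?_map,
          show ((fun (p : String × Option String) => p.1 == q.1) ∘
            (fun (t : String × Option String × Option String) => (t.1, t.2.2)))
            = (fun (t : String × Option String × Option String) => t.1 == q.1) from rfl,
          hqk, hX]
        rfl
      simp [hT, hB]
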